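-- pv_equiv track=rewrite | github.com/wuyushuwys/HDTF | utils.py | get_largest_face
-- ===== SOURCE A (Python) =====
-- def get_largest_face(det_faces, h, w):
--
--     def get_location(val, length):
--         if val < 0:
--             return 0
--         elif val > length:
--             return length
--         else:
--             return val
--
--     face_areas = []
--     for det_face in det_faces:
--         left = get_location(det_face[0], w)
--         right = get_location(det_face[2], w)
--         top = get_location(det_face[1], h)
--         bottom = get_location(det_face[3], h)
--         face_area = (right - left) * (bottom - top)
--         face_areas.append(face_area)
--     largest_idx = face_areas.index(max(face_areas))
--     return det_faces[largest_idx], largest_idx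
-- ===== SOURCE B (Python) =====
-- def get_largest_face(det_faces, h, w):
--     def clamp(val, length):
--         return 0 if val < 0 else min(val, length)
--
--     best_idx = -1
--     best_area = None
--     for i, f in enumerate(det_faces):
--         area = (clamp(f[2], w) - clamp(f[0], w)) * (clamp(f[3], h) - clamp(f[1], h))
--         if best_area is None or area > best_area:
--             best_idx, best_area = i, area
--     if best_idx < 0:
--         raise ValueError("det_faces is empty")
--     return det_faces[best_idx], best_idx
-- ===== Notes on version B (the rewrite author's own statement) =====
-- stated objective: simpler
-- what changed: Single pass keeping a running best index and best clamped area (strict > preserves first-occurrence ties), instead of building a face_areas list, then max(), then list.index() rescans.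
import Mathlib
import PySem

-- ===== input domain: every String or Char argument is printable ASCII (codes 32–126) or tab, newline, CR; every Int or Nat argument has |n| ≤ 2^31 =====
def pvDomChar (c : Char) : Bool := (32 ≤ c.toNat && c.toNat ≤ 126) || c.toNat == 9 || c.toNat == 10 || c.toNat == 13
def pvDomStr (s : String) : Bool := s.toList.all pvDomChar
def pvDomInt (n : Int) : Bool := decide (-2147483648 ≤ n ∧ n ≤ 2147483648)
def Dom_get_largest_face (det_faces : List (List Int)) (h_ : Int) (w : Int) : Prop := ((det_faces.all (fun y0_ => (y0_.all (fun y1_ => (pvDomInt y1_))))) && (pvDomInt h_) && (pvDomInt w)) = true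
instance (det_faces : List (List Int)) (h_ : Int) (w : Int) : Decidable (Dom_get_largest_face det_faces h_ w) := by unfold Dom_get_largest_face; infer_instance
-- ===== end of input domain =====

-- B replaces A's build-list / max() / list.index() three-pass scheme with one pass keeping the
-- running best index and best clamped area (strict '>' preserves first-occurrence tie behaviour).

-- ===== PORT A =====
def pvGetLocation (val length : Int) : Int :=
  if val < 0 then 0 else if val > length then length else val

-- pyGetD is exact here: Pre_ guarantees every face has length ≥ 4, so indices 0..3 are in range
def pvAreaA (f : List Int) (h_ w : Int) : Int :=
  let left := pvGetLocation (PySem.List.pyGetD f 0 0) w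
  let right := pvGetLocation (PySem.List.pyGetD f 2 0) w
  let top := pvGetLocation (PySem.List.pyGetD f 1 0) h_
  let bottom := pvGetLocation (PySem.List.pyGetD f 3 0) h_
  (right - left) * (bottom - top)

def get_largest_face (det_faces : List (List Int)) (h_ : Int) (w : Int) : List Int × Int :=
  let face_areas := det_faces.foldl (fun acc f => acc ++ [pvAreaA f h_ w]) []
  match PySem.List.max? face_areas (fun y => y) with
  | none => ([], 0)      -- Python raises ValueError (max of empty list); excluded by Pre_
  | some m =>
    match PySem.List.index? face_areas m with
    | none => ([], 0)    -- unreachable: m ∈ face_areas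
    | some i => (PySem.List.pyGetD det_faces (i : Int) [], (i : Int))

-- ===== PORT B =====
def pvClamp (val length : Int) : Int :=
  if val < 0 then 0 else min val length

def pvAreaB (f : List Int) (h_ w : Int) : Int :=
  (pvClamp (PySem.List.pyGetD f 2 0) w - pvClamp (PySem.List.pyGetD f 0 0) w) *
    (pvClamp (PySem.List.pyGetD f 3 0) h_ - pvClamp (PySem.List.pyGetD f 1 0) h_)

-- one enumerate step of B's loop; state = (loop counter i, best_idx, best_area)
def pvStepB (h_ w : Int) (st : Int × Int × Option Int) (f : List Int) : Int × Int × Option Int :=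
  let area := pvAreaB f h_ w
  match st with
  | (i, _, none) => (i + 1, i, some area)
  | (i, bi, some b) => if area > b then (i + 1, i, some area) else (i + 1, bi, some b)

def get_largest_face_alt (det_faces : List (List Int)) (h_ : Int) (w : Int) : List Int × Int :=
  let st := det_faces.foldl (pvStepB h_ w) (0, -1, none)
  -- Python raises ValueError when best_idx stays -1 (empty det_faces); excluded by Pre_
  (PySem.List.pyGetD det_faces st.2.1 [], st.2.1)

-- ===== PRECONDITION & SPEC =====
-- Pre_ excludes exactly the inputs on which A raises (and B raises too): empty det_faces
-- (ValueError from max([])) and faces with fewer than 4 entries (IndexError on det_face[3]).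
def Pre_get_largest_face (det_faces : List (List Int)) (_h_ : Int) (_w : Int) : Prop :=
  det_faces ≠ [] ∧ ∀ f ∈ det_faces, 4 ≤ f.length

instance (det_faces : List (List Int)) (h_ : Int) (w : Int) : Decidable (Pre_get_largest_face det_faces h_ w) := by
  unfold Pre_get_largest_face; infer_instance

def pvWitness_get_largest_face : List (List Int) × Int × Int := ([[1, 1, 3, 4], [0, 0, 2, 2]], 5, 5)

def Spec_get_largest_face (det_faces : List (List Int)) (h_ : Int) (w : Int) (out : List Int × Int) : Prop := out = get_largest_face_alt det_faces h_ w
instance (det_faces : List (List Int)) (h_ : Int) (w : Int) (out : List Int × Int) : Decidable (Spec_get_largest_face det_faces h_ w out) := by unfold Spec_get_largest_face; infer_instance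

-- ===== CLAIM (what is proved, stated in full; the proofs are below) =====
def Claim_equal_get_largest_face : Prop := ∀ (det_faces : List (List Int)) (h_ : Int) (w : Int), Dom_get_largest_face det_faces h_ w → Pre_get_largest_face det_faces h_ w → Spec_get_largest_face det_faces h_ w (get_largest_face det_faces h_ w)

-- ===== LEMMAS AND PROOFS =====

-- the two clamping helpers agree
theorem pvLoc_eq_clamp (v L : Int) : pvGetLocation v L = pvClamp v L := by
  simp only [pvGetLocation, pvClamp, min_def]
  split_ifs <;> omega

theorem pvArea_eq (f : List Int) (h_ w : Int) : pvAreaA f h_ w = pvAreaB f h_ w := by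
  simp [pvAreaA, pvAreaB, pvLoc_eq_clamp]

-- B's step seen on the precomputed area
def pvIStep (st : Int × Int × Option Int) (a : Int) : Int × Int × Option Int :=
  match st with
  | (i, _, none) => (i + 1, i, some a)
  | (i, bi, some b) => if a > b then (i + 1, i, some a) else (i + 1, bi, some b)

theorem foldl_max_mem (t : List Int) (a : Int) : t.foldl max a = a ∨ t.foldl max a ∈ t := by
  have h := PySem.List.max?_mem (PySem.List.max?_id_cons a t)
  simpa using h

-- running-best invariant of B's loop: the counter advances by the length, the best area becomes
-- the running max, and the best index moves to c + (first index of that max in rest) iff it beats a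
theorem pvFold_run (rest : List Int) : ∀ (c bi a : Int),
    rest.foldl pvIStep (c, bi, some a) =
      (c + rest.length,
       if a < rest.foldl max a
         then c + (((PySem.List.index? rest (rest.foldl max a)).getD 0 : Nat) : Int)
         else bi,
       some (rest.foldl max a)) := by
  induction rest with
  | nil => intro c bi a; simp
  | cons x t ih =>
    intro c bi a
    simp only [List.foldl_cons, pvIStep, List.length_cons]
    by_cases hxa : x > a
    · rw [if_pos hxa, ih, max_eq_right (le_of_lt hxa)]
      have hxM := (PySem.List.le_foldl_max t x).1
      by_cases hlt : x < t.foldl max x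
      · have hne : x ≠ t.foldl max x := ne_of_lt hlt
        have hmem : t.foldl max x ∈ t := by
          rcases foldl_max_mem t x with h | h
          · exact absurd h.symm hne
          · exact h
        obtain ⟨j, hj⟩ := Option.isSome_iff_exists.mp
          ((PySem.List.index?_isSome_iff t (t.foldl max x)).mpr hmem)
        rw [if_pos hlt, if_pos (lt_trans hxa hlt),
          PySem.List.index?_cons_of_ne t hne, hj]
        simp only [Option.map_some, Option.getD_some, Prod.mk.injEq,
          and_true]
        push_cast; omega
      · have hMx : t.foldl max x = x := le_antisymm (not_lt.mp hlt) hxM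
        rw [if_neg hlt, if_pos (by omega : a < t.foldl max x), hMx,
          PySem.List.index?_cons_self]
        simp only [Option.getD_some, Prod.mk.injEq,
          and_true]
        push_cast; omega
    · rw [if_neg hxa, ih, max_eq_left (not_lt.mp hxa)]
      by_cases hlt : a < t.foldl max a
      · have hne : x ≠ t.foldl max a := by omega
        have hmem : t.foldl max a ∈ t := by
          rcases foldl_max_mem t a with h | h
          · omega
          · exact h
        obtain ⟨j, hj⟩ := Option.isSome_iff_exists.mp
          ((PySem.List.index?_isSome_iff t (t.foldl max a)).mpr hmem)
        rw [if_pos hlt, if_pos hlt, PySem.List.index?_cons_of_ne t hne, hj]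
        simp only [Option.map_some, Option.getD_some, Prod.mk.injEq,
          and_true]
        push_cast; omega
      · rw [if_neg hlt, if_neg hlt]
        simp only [Prod.mk.injEq, and_true]
        push_cast; omega

-- ===== VERDICT (by name: the statement is the Claim_ definition above) =====
theorem get_largest_face_spec : Claim_equal_get_largest_face := by
  intro det h_ w _ hpre
  obtain ⟨hne, -⟩ := hpre
  unfold Spec_get_largest_face
  match det, hne with
  | f :: fs, _ =>
    unfold get_largest_face get_largest_face_alt
    rw [PySem.List.foldl_append_singleton_eq_map]
    have hmapeq : (f :: fs).map (fun g => pvAreaA g h_ w)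
        = pvAreaB f h_ w :: fs.map (fun g => pvAreaB g h_ w) := by
      simp [pvArea_eq]
    have hb : (f :: fs).foldl (pvStepB h_ w) (0, -1, none)
        = (fs.map (fun g => pvAreaB g h_ w)).foldl pvIStep (1, 0, some (pvAreaB f h_ w)) := by
      rw [List.foldl_map]
      simp only [List.foldl_cons]
      congr 1
    simp only [List.nil_append, hmapeq, hb, PySem.List.max?_id_cons, pvFold_run]
    set a0 := pvAreaB f h_ w with ha0
    set rest := fs.map (fun g => pvAreaB g h_ w) with hrest
    have haM := (PySem.List.le_foldl_max rest a0).1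
    by_cases hlt : a0 < rest.foldl max a0
    · have hne2 : a0 ≠ rest.foldl max a0 := ne_of_lt hlt
      have hmem : rest.foldl max a0 ∈ rest := by
        rcases foldl_max_mem rest a0 with h | h
        · exact absurd h.symm hne2
        · exact h
      obtain ⟨j, hj⟩ := Option.isSome_iff_exists.mp
        ((PySem.List.index?_isSome_iff rest (rest.foldl max a0)).mpr hmem)
      rw [PySem.List.index?_cons_of_ne rest hne2, hj]
      simp only [Option.map_some, if_pos hlt, Option.getD_some, Prod.mk.injEq]
      constructor
      · congr 1
        push_cast; ring
      · push_cast; ring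
    · have hMa : rest.foldl max a0 = a0 := le_antisymm (not_lt.mp hlt) haM
      rw [hMa, PySem.List.index?_cons_self]
      simp
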